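-- pv_equiv track=rewrite | github.com/queelius/computational-explorations | src/approx_algorithms.py | _find_k_cliques
-- ===== SOURCE A (Python) =====
-- from typing import (
--     Any,
--     Callable,
--     Dict,
--     FrozenSet,
--     List,
--     Optional,
--     Set,
--     Tuple,
-- )
--
-- def _find_k_cliques(
--     adj: Dict[int, Set[int]],
--     n: int,
--     k: int,
--     limit: int = 500,
-- ) -> List[Tuple[int, ...]]:
--     """Find up to `limit` cliques of size k in the adjacency structure."""
--     cliques: List[Tuple[int, ...]] = []
--     vertices = sorted(v for v in range(1, n + 1) if adj.get(v))
--
--     def extend(current: List[int], candidates: List[int]) -> bool: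
--         if len(cliques) >= limit:
--             return True
--         if len(current) == k:
--             cliques.append(tuple(current))
--             return len(cliques) >= limit
--         needed = k - len(current)
--         for idx, v in enumerate(candidates):
--             if len(candidates) - idx < needed:
--                 break
--             if all(v in adj.get(u, set()) for u in current):
--                 new_cands = [w for w in candidates[idx + 1:] if w in adj.get(v, set())]
--                 if extend(current + [v], new_cands):
--                     return True
--         return False
--
--     extend([], vertices)
--     return cliques
-- ===== SOURCE B (Python) =====
-- def _find_k_cliques(adj, n, k, limit=500):
--     """Breadth-first level expansion: k staged passes build the frontier of all
--     partial cliques of each size (with the too-few-candidates prune), then the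
--     finished cliques are truncated to `limit`."""
--     vertices = sorted(v for v in range(1, n + 1) if adj.get(v))
--     if k < 0 or k > len(vertices):
--         return []
--     frontier = [([], vertices)]
--     for _ in range(k):
--         frontier = [
--             (cur + [v], [w for w in cands[i + 1:] if w in adj.get(v, set())])
--             for cur, cands in frontier
--             for i, v in enumerate(cands)
--             if len(cands) - i >= k - len(cur)
--         ]
--     return [tuple(cur) for cur, _ in frontier][:max(limit, 0)]
-- ===== Notes on version B (the rewrite author's own statement) =====
-- stated objective: alternative
-- what changed: Replaces the depth-first recursive backtracking with a shared mutable result list and limit stop-flag by a breadth-first level-by-level expansion: k staged passes map the whole frontier of (partial clique, candidates) pairs to the next size, then the finished cliques (which appear in the same left-to-right order because all of them sit at depth k) are truncated to limit; the always-true adjacency re-check is dropped.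
import Mathlib
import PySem

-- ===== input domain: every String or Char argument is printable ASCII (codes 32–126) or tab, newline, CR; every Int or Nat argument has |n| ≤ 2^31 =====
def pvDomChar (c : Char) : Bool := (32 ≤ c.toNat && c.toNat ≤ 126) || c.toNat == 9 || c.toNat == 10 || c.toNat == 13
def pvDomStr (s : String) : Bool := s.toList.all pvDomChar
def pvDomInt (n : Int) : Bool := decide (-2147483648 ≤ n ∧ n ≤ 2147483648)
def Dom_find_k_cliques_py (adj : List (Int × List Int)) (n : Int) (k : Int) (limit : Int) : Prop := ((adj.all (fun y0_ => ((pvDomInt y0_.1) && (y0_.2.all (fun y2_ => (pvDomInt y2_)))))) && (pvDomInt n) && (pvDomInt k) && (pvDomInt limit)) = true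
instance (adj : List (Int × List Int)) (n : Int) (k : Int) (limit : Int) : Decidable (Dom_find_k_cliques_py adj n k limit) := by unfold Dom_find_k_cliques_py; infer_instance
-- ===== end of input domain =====

-- B replaces A's depth-first recursive backtracking (mutable result list, limit stop-flag)
-- by a breadth-first level-by-level frontier expansion truncated to `limit` at the end;
-- objective: alternative decomposition, same values.


-- shared lookup helpers for the Python dict argument: adj.get(u, set()) and adj.get(v)
def pvAdjGetD (adj : List (Int × List Int)) (u : Int) : List Int :=
  PySem.Dict.getD (PySem.Dict.mk adj) u []
def pvAdjGet? (adj : List (Int × List Int)) (v : Int) : Option (List Int) :=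
  PySem.Dict.get? (PySem.Dict.mk adj) v
-- vertices = sorted(v for v in range(1, n+1) if adj.get(v))  (identical line in A and B)
def pvVertices (adj : List (Int × List Int)) (n : Int) : List Int :=
  PySem.List.sorted ((PySem.List.pyRange 1 (n + 1) 1).filter (fun v =>
    match pvAdjGet? adj v with
    | none => false
    | some s => !s.isEmpty)) (fun x => x) false

-- ===== PORT A =====
-- extend(current, candidates) with the mutable outer list `cliques` threaded through,
-- returning (cliques, the boolean the Python returns)
mutual
def extendA (adj : List (Int × List Int)) (k limit : Int)
    (cliques : List (List Int)) (current candidates : List Int) : List (List Int) × Bool :=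
  if limit ≤ (cliques.length : Int) then (cliques, true)
  else if (current.length : Int) = k then
    (cliques ++ [current], decide (limit ≤ ((cliques ++ [current]).length : Int)))
  else loopA adj k limit cliques current candidates
termination_by (candidates.length, 1)
decreasing_by exact Prod.Lex.right _ (by omega)
def loopA (adj : List (Int × List Int)) (k limit : Int)
    (cliques : List (List Int)) (current rest : List Int) : List (List Int) × Bool :=
  match rest with
  | [] => (cliques, false)
  | v :: tl =>
    -- len(candidates) - idx = length of the remaining suffix `rest`
    if ((v :: tl).length : Int) < k - (current.length : Int) then (cliques, false)
    else if current.all (fun u => (pvAdjGetD adj u).contains v) then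
      match extendA adj k limit cliques (current ++ [v])
          (tl.filter (fun w => (pvAdjGetD adj v).contains w)) with
      | (cl, true) => (cl, true)
      | (cl, false) => loopA adj k limit cl current tl
    else loopA adj k limit cliques current tl
termination_by (rest.length, 0)
decreasing_by all_goals exact Prod.Lex.left _ _ (by simp [Nat.lt_succ_of_le (List.length_filter_le _ tl)])
end

def find_k_cliques_py (adj : List (Int × List Int)) (n : Int) (k : Int) (limit : Int) : List (List Int) :=
  (extendA adj k limit [] [] (pvVertices adj n)).1

-- ===== PORT B =====
-- the inner double comprehension: for i,v in enumerate(cands) with the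
-- len(cands)-i >= k-len(cur) filter, producing (cur+[v], filtered later candidates)
def expandB (adj : List (Int × List Int)) (k : Int) (cur : List Int) :
    List Int → List (List Int × List Int)
  | [] => []
  | v :: tl =>
    (if k - (cur.length : Int) ≤ ((v :: tl).length : Int) then
        [(cur ++ [v], tl.filter (fun w => (pvAdjGetD adj v).contains w))]
      else [])
      ++ expandB adj k cur tl

def find_k_cliques_py_alt (adj : List (Int × List Int)) (n : Int) (k : Int) (limit : Int) : List (List Int) :=
  let vertices := pvVertices adj n
  if k < 0 ∨ (vertices.length : Int) < k then []
  else
    let frontier := (List.range k.toNat).foldl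
      (fun fr _ => fr.flatMap (fun p => expandB adj k p.1 p.2)) [([], vertices)]
    (frontier.map Prod.fst).take (max limit 0).toNat

-- ===== PRECONDITION & SPEC =====
def Spec_find_k_cliques_py (adj : List (Int × List Int)) (n : Int) (k : Int) (limit : Int) (out : List (List Int)) : Prop := out = find_k_cliques_py_alt adj n k limit
instance (adj : List (Int × List Int)) (n : Int) (k : Int) (limit : Int) (out : List (List Int)) : Decidable (Spec_find_k_cliques_py adj n k limit out) := by unfold Spec_find_k_cliques_py; infer_instance

-- ===== CLAIM (what is proved, stated in full; the proofs are below) =====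
def Claim_equal_find_k_cliques_py : Prop := ∀ (adj : List (Int × List Int)) (n : Int) (k : Int) (limit : Int), Dom_find_k_cliques_py adj n k limit → Spec_find_k_cliques_py adj n k limit (find_k_cliques_py adj n k limit)

-- ===== LEMMAS AND PROOFS =====

-- DFS-preorder list of k-cliques below a node, with A's entry pruning (proof-side spec)
mutual
def genB (adj : List (Int × List Int)) (k : Int) (current candidates : List Int) : List (List Int) :=
  if (candidates.length : Int) < k - (current.length : Int) then []
  else if (current.length : Int) = k then [current]
  else loopB adj k current candidates
termination_by (candidates.length, 1)
decreasing_by exact Prod.Lex.right _ (by omega)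
def loopB (adj : List (Int × List Int)) (k : Int) (current rest : List Int) : List (List Int) :=
  match rest with
  | [] => []
  | v :: tl =>
    genB adj k (current ++ [v]) (tl.filter (fun w => (pvAdjGetD adj v).contains w))
      ++ loopB adj k current tl
termination_by (rest.length, 0)
decreasing_by all_goals exact Prod.Lex.left _ _ (by simp [Nat.lt_succ_of_le (List.length_filter_le _ tl)])
end

-- same DFS without the entry pruning (proof-side spec)
mutual
def genC (adj : List (Int × List Int)) (k : Int) (current candidates : List Int) : List (List Int) :=
  if (current.length : Int) = k then [current] else loopC adj k current candidates
termination_by (candidates.length, 1)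
decreasing_by exact Prod.Lex.right _ (by omega)
def loopC (adj : List (Int × List Int)) (k : Int) (current rest : List Int) : List (List Int) :=
  match rest with
  | [] => []
  | v :: tl =>
    genC adj k (current ++ [v]) (tl.filter (fun w => (pvAdjGetD adj v).contains w))
      ++ loopC adj k current tl
termination_by (rest.length, 0)
decreasing_by all_goals exact Prod.Lex.left _ _ (by simp [Nat.lt_succ_of_le (List.length_filter_le _ tl)])
end

-- the truncating consumer relating A's limit stop to a take
def feedB (limit : Int) (cliques : List (List Int)) : List (List Int) → List (List Int)
  | [] => cliques
  | c :: tl => if limit ≤ (cliques.length : Int) then cliques else feedB limit (cliques ++ [c]) tl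

-- every candidate is adjacent to every vertex of the current clique
def InvAB (adj : List (Int × List Int)) (current cands : List Int) : Prop :=
  ∀ v ∈ cands, ∀ u ∈ current, (pvAdjGetD adj u).contains v = true

lemma feedB_full (limit : Int) (cliques xs : List (List Int))
    (h : limit ≤ (cliques.length : Int)) : feedB limit cliques xs = cliques := by
  cases xs with
  | nil => rfl
  | cons c tl => simp [feedB, h]

lemma feedB_append (limit : Int) (cliques xs ys : List (List Int)) :
    feedB limit cliques (xs ++ ys) = feedB limit (feedB limit cliques xs) ys := by
  induction xs generalizing cliques with
  | nil => rfl
  | cons c tl ih =>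
    by_cases h : limit ≤ (cliques.length : Int)
    · simp [feedB, h, feedB_full limit cliques ys h]
    · simp [feedB, h, ih]

lemma genB_nil (adj : List (Int × List Int)) (k : Int) (current cands : List Int)
    (h : (current.length : Int) + cands.length < k) : genB adj k current cands = [] := by
  rw [genB]
  simp only [if_pos (by omega : (cands.length : Int) < k - (current.length : Int))]

lemma loopB_nil (adj : List (Int × List Int)) (k : Int) (current rest : List Int)
    (h : (current.length : Int) + rest.length < k) : loopB adj k current rest = [] := by
  induction rest with
  | nil => rw [loopB]
  | cons v tl ih =>
    rw [loopB]
    have hf := List.length_filter_le (fun w => (pvAdjGetD adj v).contains w) tl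
    rw [genB_nil adj k (current ++ [v]) _ (by
      simp only [List.length_cons] at h
      simp only [List.length_append, List.length_cons, List.length_nil]
      push_cast at h ⊢; omega)]
    rw [ih (by simp only [List.length_cons] at h; push_cast at h ⊢; omega)]
    simp

-- main lemma on A's side: A's extend equals feeding the DFS list into the truncating
-- consumer, and the boolean A returns is exactly "the result is full"
lemma extendA_eq_feed (adj : List (Int × List Int)) (k limit : Int) :
    ∀ (N : Nat) (cands : List Int), cands.length ≤ N →
      ∀ (current : List Int) (cliques : List (List Int)), InvAB adj current cands →
      extendA adj k limit cliques current cands =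
        (feedB limit cliques (genB adj k current cands),
         decide (limit ≤ ((feedB limit cliques (genB adj k current cands)).length : Int))) := by
  intro N
  induction N with
  | zero =>
    intro cands hlen current cliques _
    have hc : cands = [] := List.eq_nil_of_length_eq_zero (Nat.le_zero.mp hlen)
    subst hc
    rw [extendA, genB]
    by_cases hfull : limit ≤ (cliques.length : Int)
    · rw [if_pos hfull, feedB_full _ _ _ hfull]
      simp [hfull]
    · rw [if_neg hfull]
      by_cases hk : (current.length : Int) = k
      · rw [if_pos hk, if_neg (by omega : ¬ (([] : List Int).length : Int) < k - (current.length : Int)), if_pos hk]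
        simp [feedB, hfull]
      · rw [if_neg hk, loopA]
        by_cases hpr : (([] : List Int).length : Int) < k - (current.length : Int)
        · rw [if_pos hpr]; simp [feedB, hfull]
        · rw [if_neg hpr, if_neg hk, loopB]; simp [feedB, hfull]
  | succ N ih =>
    intro cands hlen current cliques hinv
    have loop : ∀ (rest : List Int), rest.length ≤ N + 1 →
        InvAB adj current rest →
        ∀ cl : List (List Int), ¬ limit ≤ (cl.length : Int) →
        loopA adj k limit cl current rest =
          (feedB limit cl (loopB adj k current rest),
           decide (limit ≤ ((feedB limit cl (loopB adj k current rest)).length : Int))) := by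
      intro rest
      induction rest with
      | nil =>
        intro _ _ cl hfull
        rw [loopA, loopB]
        simp [feedB, hfull]
      | cons v tl ihrest =>
        intro hrlen hrinv cl hfull
        rw [loopA, loopB]
        by_cases hbrk : ((v :: tl).length : Int) < k - (current.length : Int)
        · rw [if_pos hbrk]
          have hf := List.length_filter_le (fun w => (pvAdjGetD adj v).contains w) tl
          rw [genB_nil adj k (current ++ [v]) _ (by
            simp only [List.length_cons] at hbrk
            simp only [List.length_append, List.length_cons, List.length_nil]
            push_cast at hbrk ⊢; omega)]
          rw [loopB_nil adj k current tl (by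
            simp only [List.length_cons] at hbrk
            push_cast at hbrk ⊢; omega)]
          simp [feedB, hfull]
        · rw [if_neg hbrk]
          have hall : (current.all fun u => (pvAdjGetD adj u).contains v) = true := by
            rw [List.all_eq_true]
            intro u hu
            exact hrinv v (by simp) u hu
          rw [if_pos hall]
          have hchild := ih (tl.filter (fun w => (pvAdjGetD adj v).contains w))
            (by
              have hf := List.length_filter_le (fun w => (pvAdjGetD adj v).contains w) tl
              simp only [List.length_cons] at hrlen; omega)
            (current ++ [v]) cl
            (by
              intro w hw u hu
              rcases List.mem_filter.mp hw with ⟨hwtl, hwadj⟩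
              rcases List.mem_append.mp hu with hu' | hu'
              · exact hrinv w (List.mem_cons_of_mem v hwtl) u hu'
              · rw [List.mem_singleton.mp hu']
                exact hwadj)
          rw [hchild, feedB_append]
          by_cases hres : limit ≤ ((feedB limit cl (genB adj k (current ++ [v]) (tl.filter (fun w => (pvAdjGetD adj v).contains w)))).length : Int)
          · rw [feedB_full _ _ _ hres, decide_eq_true hres]
          · rw [decide_eq_false hres]
            exact ihrest (by simp only [List.length_cons] at hrlen; omega)
              (fun w hw u hu => hrinv w (List.mem_cons_of_mem v hw) u hu)
              (feedB limit cl (genB adj k (current ++ [v]) (tl.filter (fun w => (pvAdjGetD adj v).contains w)))) hres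
    rw [extendA, genB]
    by_cases hfull : limit ≤ (cliques.length : Int)
    · rw [if_pos hfull, feedB_full _ _ _ hfull]
      simp [hfull]
    · rw [if_neg hfull]
      by_cases hk : (current.length : Int) = k
      · rw [if_pos hk, if_neg (by omega : ¬ ((cands.length : Int) < k - (current.length : Int))), if_pos hk]
        simp [feedB, hfull]
      · rw [if_neg hk]
        by_cases hpr : ((cands.length : Int) < k - (current.length : Int))
        · rw [if_pos hpr]
          cases cands with
          | nil => rw [loopA]; simp [feedB, hfull]
          | cons v tl => rw [loopA, if_pos hpr]; simp [feedB, hfull]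
        · rw [if_neg hpr, if_neg hk]
          exact loop cands hlen hinv cliques hfull

-- feeding into the truncating consumer is a take
lemma feedB_take (limit : Int) : ∀ (xs cl : List (List Int)),
    feedB limit cl xs = cl ++ xs.take (limit - cl.length).toNat := by
  intro xs
  induction xs with
  | nil => intro cl; simp [feedB]
  | cons c tl ih =>
    intro cl
    rw [feedB]
    by_cases h : limit ≤ (cl.length : Int)
    · rw [if_pos h]
      have : (limit - cl.length).toNat = 0 := by omega
      simp [this]
    · rw [if_neg h, ih]
      have h1 : (limit - ((cl ++ [c]).length : Int)).toNat = (limit - cl.length).toNat - 1 := by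
        simp only [List.length_append, List.length_cons, List.length_nil]
        push_cast; omega
      have h2 : (limit - cl.length).toNat = ((limit - cl.length).toNat - 1) + 1 := by omega
      rw [h1, h2, List.take_succ_cons]
      simp

-- unpruned DFS of an unreachable branch is empty
lemma genC_nil (adj : List (Int × List Int)) (k : Int) :
    ∀ (N : Nat) (cands : List Int), cands.length ≤ N →
    ∀ current : List Int, (current.length : Int) + cands.length < k →
    genC adj k current cands = [] := by
  intro N
  induction N with
  | zero =>
    intro cands hlen current h
    have hc : cands = [] := List.eq_nil_of_length_eq_zero (Nat.le_zero.mp hlen)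
    subst hc
    rw [genC, if_neg (by simp at h; omega), loopC]
  | succ N ih =>
    intro cands hlen current h
    have hk : ¬ (current.length : Int) = k := by omega
    rw [genC, if_neg hk]
    have loop : ∀ rest : List Int, rest.length ≤ N + 1 →
        (current.length : Int) + rest.length < k → loopC adj k current rest = [] := by
      intro rest
      induction rest with
      | nil => intro _ _; rw [loopC]
      | cons v tl ihr =>
        intro hrlen hr
        rw [loopC]
        have hf := List.length_filter_le (fun w => (pvAdjGetD adj v).contains w) tl
        rw [ih (tl.filter (fun w => (pvAdjGetD adj v).contains w))
            (by simp only [List.length_cons] at hrlen; omega)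
            (current ++ [v])
            (by simp only [List.length_cons] at hr
                simp only [List.length_append, List.length_cons, List.length_nil]
                push_cast at hr ⊢; omega)]
        rw [ihr (by simp only [List.length_cons] at hrlen; omega)
            (by simp only [List.length_cons] at hr; push_cast at hr ⊢; omega)]
        simp
    exact loop cands hlen h

-- the pruned DFS equals the unpruned one below k
lemma genB_eq_genC (adj : List (Int × List Int)) (k : Int) :
    ∀ (N : Nat) (cands : List Int), cands.length ≤ N →
    ∀ current : List Int, (current.length : Int) ≤ k →
    genB adj k current cands = genC adj k current cands := by
  intro N
  induction N with
  | zero =>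
    intro cands hlen current hle
    have hc : cands = [] := List.eq_nil_of_length_eq_zero (Nat.le_zero.mp hlen)
    subst hc
    rw [genB, genC]
    by_cases hk : (current.length : Int) = k
    · rw [if_neg (by omega : ¬ (([] : List Int).length : Int) < k - (current.length : Int)), if_pos hk, if_pos hk]
    · rw [if_pos (by simp; omega : (([] : List Int).length : Int) < k - (current.length : Int)), if_neg hk, loopC]
  | succ N ih =>
    intro cands hlen current hle
    rw [genB, genC]
    by_cases hpr : (cands.length : Int) < k - (current.length : Int)
    · rw [if_pos hpr]
      by_cases hk : (current.length : Int) = k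
      · omega
      · rw [if_neg hk]
        exact (genC_nil adj k (N + 1) cands hlen current (by omega)).symm.trans
          (by rw [genC, if_neg hk])
    · rw [if_neg hpr]
      by_cases hk : (current.length : Int) = k
      · rw [if_pos hk, if_pos hk]
      · rw [if_neg hk, if_neg hk]
        have loop : ∀ rest : List Int, rest.length ≤ N + 1 →
            loopB adj k current rest = loopC adj k current rest := by
          intro rest
          induction rest with
          | nil => intro _; rw [loopB, loopC]
          | cons v tl ihr =>
            intro hrlen
            rw [loopB, loopC]
            have hf := List.length_filter_le (fun w => (pvAdjGetD adj v).contains w) tl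
            rw [ih (tl.filter (fun w => (pvAdjGetD adj v).contains w))
                (by simp only [List.length_cons] at hrlen; omega)
                (current ++ [v])
                (by simp only [List.length_append, List.length_cons, List.length_nil]
                    push_cast; omega)]
            rw [ihr (by simp only [List.length_cons] at hrlen; omega)]
        exact loop cands hlen
    -- note: in the pruned case current.length < k is forced since cands.length ≥ 0

-- the pruned DFS from an over-long current is empty (covers k < 0 at the root)
lemma genB_lt (adj : List (Int × List Int)) (k : Int) :
    ∀ (N : Nat) (cands : List Int), cands.length ≤ N →
    ∀ current : List Int, k < (current.length : Int) →
    genB adj k current cands = [] := by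
  intro N
  induction N with
  | zero =>
    intro cands hlen current hlt
    have hc : cands = [] := List.eq_nil_of_length_eq_zero (Nat.le_zero.mp hlen)
    subst hc
    rw [genB]
    by_cases hpr : (([] : List Int).length : Int) < k - (current.length : Int)
    · rw [if_pos hpr]
    · rw [if_neg hpr, if_neg (by omega), loopB]
  | succ N ih =>
    intro cands hlen current hlt
    rw [genB]
    by_cases hpr : ((cands.length : Int) < k - (current.length : Int))
    · rw [if_pos hpr]
    · rw [if_neg hpr, if_neg (by omega)]
      have loop : ∀ rest : List Int, rest.length ≤ N + 1 →
          loopB adj k current rest = [] := by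
        intro rest
        induction rest with
        | nil => intro _; rw [loopB]
        | cons v tl ihr =>
          intro hrlen
          rw [loopB]
          have hf := List.length_filter_le (fun w => (pvAdjGetD adj v).contains w) tl
          rw [ih (tl.filter (fun w => (pvAdjGetD adj v).contains w))
              (by simp only [List.length_cons] at hrlen; omega)
              (current ++ [v])
              (by simp only [List.length_append, List.length_cons, List.length_nil]
                  push_cast; omega)]
          rw [ihr (by simp only [List.length_cons] at hrlen; omega)]
          simp
      exact loop cands hlen

-- every child produced by expandB extends the clique by one vertex
lemma expandB_len (adj : List (Int × List Int)) (k : Int) (cur : List Int) :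
    ∀ cands : List Int, ∀ p ∈ expandB adj k cur cands, p.1.length = cur.length + 1 := by
  intro cands
  induction cands with
  | nil => intro p hp; simp [expandB] at hp
  | cons v tl ih =>
    intro p hp
    rw [expandB] at hp
    rcases List.mem_append.mp hp with h | h
    · split at h
      · rw [List.mem_singleton.mp h]; simp
      · simp at h
    · exact ih p h

-- expanding one frontier node and recursing unpruned equals the unpruned loop
lemma expandB_flat (adj : List (Int × List Int)) (k : Int) (cur : List Int) :
    ∀ cands : List Int,
      (expandB adj k cur cands).flatMap (fun p => genC adj k p.1 p.2) =
        loopC adj k cur cands := by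
  intro cands
  induction cands with
  | nil => rw [expandB, loopC]; rfl
  | cons v tl ih =>
    rw [expandB, loopC, List.flatMap_append]
    by_cases hc : k - (cur.length : Int) ≤ ((v :: tl).length : Int)
    · rw [if_pos hc]
      simp only [List.flatMap_cons, List.flatMap_nil, List.append_nil]
      rw [ih]
    · rw [if_neg hc]
      have hf := List.length_filter_le (fun w => (pvAdjGetD adj v).contains w) tl
      rw [genC_nil adj k ((tl.filter (fun w => (pvAdjGetD adj v).contains w)).length)
          _ le_rfl (cur ++ [v])
          (by simp only [List.length_cons] at hc
              simp only [List.length_append, List.length_cons, List.length_nil]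
              push_cast at hc ⊢; omega)]
      simp only [List.flatMap_nil, List.nil_append]
      rw [ih]

-- a constant fold over range is an iterate
lemma foldl_range_iterate {α : Type} (g : α → α) :
    ∀ (m : Nat) (s : α), (List.range m).foldl (fun s _ => g s) s = g^[m] s := by
  intro m
  induction m with
  | zero => intro s; rfl
  | succ m ih =>
    intro s
    rw [List.range_succ, List.foldl_append, ih, Function.iterate_succ_apply']
    rfl

-- BFS level expansion of a frontier of uniform depth yields the unpruned DFS lists
lemma levels (adj : List (Int × List Int)) (k : Int) :
    ∀ (j : Nat) (fr : List (List Int × List Int)),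
      (∀ p ∈ fr, (p.1.length : Int) + j = k) →
      (((List.flatMap (fun p => expandB adj k p.1 p.2))^[j] fr).map Prod.fst)
        = fr.flatMap (fun p => genC adj k p.1 p.2) := by
  intro j
  induction j with
  | zero =>
    intro fr hinv
    simp only [Function.iterate_zero, id_eq]
    induction fr with
    | nil => rfl
    | cons p fr' ihf =>
      rw [List.map_cons, List.flatMap_cons]
      have hk : (p.1.length : Int) = k := by
        have := hinv p (by simp); omega
      rw [genC, if_pos hk]
      rw [ihf (fun q hq => hinv q (List.mem_cons_of_mem p hq))]
      rfl
  | succ j ihj =>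
    intro fr hinv
    rw [Function.iterate_succ_apply]
    rw [ihj (fr.flatMap (fun p => expandB adj k p.1 p.2)) (by
      intro p hp
      rcases List.mem_flatMap.mp hp with ⟨q, hq, hpq⟩
      have hlen := expandB_len adj k q.1 q.2 p hpq
      have := hinv q hq
      rw [hlen]; push_cast at this ⊢; omega)]
    induction fr with
    | nil => rfl
    | cons p fr' ihf =>
      rw [List.flatMap_cons, List.flatMap_cons, List.flatMap_append]
      have hp := hinv p (by simp)
      rw [expandB_flat adj k p.1 p.2]
      rw [ihf (fun q hq => hinv q (List.mem_cons_of_mem p hq))]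
      rw [genC, if_neg (by omega)]

-- ===== VERDICT (by name: the statement is the Claim_ definition above) =====
theorem find_k_cliques_py_spec : Claim_equal_find_k_cliques_py := by
  intro adj n k limit _
  unfold Spec_find_k_cliques_py find_k_cliques_py find_k_cliques_py_alt
  rw [extendA_eq_feed adj k limit (pvVertices adj n).length (pvVertices adj n) le_rfl [] []
    (by intro v _ u hu; exact absurd hu (List.not_mem_nil))]
  by_cases hk : k < 0 ∨ ((pvVertices adj n).length : Int) < k
  · rw [if_pos hk]
    rcases hk with hk | hk
    · rw [genB_lt adj k (pvVertices adj n).length (pvVertices adj n) le_rfl []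
        (by simp; omega)]
      rfl
    · rw [genB, if_pos (by simpa using hk)]
      rfl
  · rw [if_neg hk]
    push Not at hk
    show _ = List.take (max limit 0).toNat (List.map Prod.fst
      ((List.range k.toNat).foldl (fun fr _ => fr.flatMap (fun p => expandB adj k p.1 p.2))
        [([], pvVertices adj n)]))
    rw [foldl_range_iterate]
    rw [levels adj k k.toNat [([], pvVertices adj n)] (by
      intro p hp
      rw [List.mem_singleton.mp hp]
      simp; omega)]
    rw [List.flatMap_cons, List.flatMap_nil, List.append_nil]
    rw [← genB_eq_genC adj k (pvVertices adj n).length (pvVertices adj n) le_rfl []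
      (by simp; omega)]
    rw [feedB_take]
    have : (limit - (([] : List (List Int)).length : Int)).toNat = (max limit 0).toNat := by
      simp; omega
    rw [this]
    rfl
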